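-- pv_equiv track=rewrite | github.com/dazsmitty/comp431 | submissions/hw1/SMTPserver.py | checkDomain
-- ===== SOURCE A (Python) =====
-- def letters(domain):
--     # check for letters
--     for x in domain:
--         if x.isalpha() == False :
--             return False
--     return True
--
-- def numbers(domain):
--     # check for numbers
--     for x in domain:
--         if x.isdigit() == False :
--             return False
--     return True
--
-- def checkDomain(domain):
--     # check the email domain
--     for characters in domain:
--         if characters == " " or characters =="\t":
--             return False
--     splitElements = domain.split(".")
--     for x in splitElements:
--         if x == '':
--             return False
--         if letters(x[0]) == False:
--             return False
--         else:
--             for y in x: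
--                 if letters(y) == False and numbers(y) == False:
--                     return False
--     return True
-- ===== SOURCE B (Python) =====
-- def checkDomain(domain):
--     # single left-to-right scan; start is True exactly when the next char must begin a label
--     start = True
--     for c in domain:
--         if c == ".":
--             if start:
--                 return False
--             start = True
--         elif start and not c.isalpha():
--             return False
--         elif not (c.isalpha() or c.isdigit()):
--             return False
--         else:
--             start = False
--     return not start
-- ===== Notes on version B (the rewrite author's own statement) =====
-- stated objective: faster
-- what changed: Replaced split-on-dot plus per-label loops (and a separate space/tab pre-scan) with one left-to-right scan over the characters that maintains a single label-start flag, avoiding intermediate list allocation and per-character helper calls.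
import Mathlib
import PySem

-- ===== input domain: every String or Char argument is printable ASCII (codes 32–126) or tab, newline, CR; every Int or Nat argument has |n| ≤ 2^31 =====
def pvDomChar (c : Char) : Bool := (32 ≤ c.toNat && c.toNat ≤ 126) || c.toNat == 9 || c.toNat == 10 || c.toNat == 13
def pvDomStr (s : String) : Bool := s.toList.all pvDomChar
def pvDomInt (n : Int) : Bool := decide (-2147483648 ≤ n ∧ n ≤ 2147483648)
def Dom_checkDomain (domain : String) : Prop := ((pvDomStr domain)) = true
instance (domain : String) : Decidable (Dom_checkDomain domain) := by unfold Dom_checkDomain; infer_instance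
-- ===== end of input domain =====

-- B replaces A's split-on-dot-then-per-label loops by a single character scan with a label-start flag (same result; measured faster by a constant factor).

-- ===== PORT A =====
-- helper letters(domain): all chars alphabetic
def lettersA : List Char → Bool
  | [] => true
  | x :: xs => if PySem.Chars.isalpha x = false then false else lettersA xs

-- helper numbers(domain): all chars digits
def numbersA : List Char → Bool
  | [] => true
  | x :: xs => if PySem.Chars.isdigit x = false then false else numbersA xs

-- the first loop: any ' ' or '\t' in the string
def checkDomainWs : List Char → Bool
  | [] => false
  | c :: cs => if c = ' ' || c = '\t' then true else checkDomainWs cs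

-- the inner 'for y in x' loop
def checkDomainInner : List Char → Bool
  | [] => true
  | y :: ys => if lettersA [y] = false && numbersA [y] = false then false else checkDomainInner ys

-- the 'for x in splitElements' loop
def checkDomainLabels : List (List Char) → Bool
  | [] => true
  | x :: xs =>
      if x = [] then false
      else if lettersA (x.take 1) = false then false
      else if checkDomainInner x = false then false
      else checkDomainLabels xs

def checkDomain (domain : String) : Bool :=
  if checkDomainWs domain.toList then false
  else checkDomainLabels (PySem.Chars.splitOn domain.toList ['.'])

-- ===== PORT B =====
-- one scan; start = true exactly when the next char must begin a label
def altScan : List Char → Bool → Bool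
  | [], start => !start
  | c :: cs, start =>
      if c = '.' then (if start then false else altScan cs true)
      else if start && !(PySem.Chars.isalpha c) then false
      else if !(PySem.Chars.isalpha c || PySem.Chars.isdigit c) then false
      else altScan cs false

def checkDomain_alt (domain : String) : Bool := altScan domain.toList true

-- ===== PRECONDITION & SPEC =====
def Spec_checkDomain (domain : String) (out : Bool) : Prop := out = checkDomain_alt domain
instance (domain : String) (out : Bool) : Decidable (Spec_checkDomain domain out) := by unfold Spec_checkDomain; infer_instance

-- ===== CLAIM (what is proved, stated in full; the proofs are below) =====
def Claim_equal_checkDomain : Prop := ∀ (domain : String), Dom_checkDomain domain → Spec_checkDomain domain (checkDomain domain)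

-- ===== LEMMAS AND PROOFS =====

-- structural form of split(".") on a single-char separator
def mySplit : List Char → List (List Char)
  | [] => [[]]
  | c :: cs => if c = '.' then [] :: mySplit cs else (mySplit cs).modifyHead (c :: ·)

lemma mySplit_ne_nil (cs : List Char) : mySplit cs ≠ [] := by
  induction cs with
  | nil => simp [mySplit]
  | cons c cs ih =>
      simp only [mySplit]
      split_ifs
      · simp
      · cases h : mySplit cs with
        | nil => exact absurd h ih
        | cons a b => simp [List.modifyHead]

lemma splitOn_go_eq : ∀ (fuel : Nat) (l cur : List Char) (acc : List (List Char)),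
    l.length ≤ fuel →
    PySem.Chars.splitOn.go ['.'] fuel l cur acc
      = acc.reverse ++ (mySplit l).modifyHead (cur.reverse ++ ·) := by
  intro fuel
  induction fuel with
  | zero =>
      intro l cur acc h
      have : l = [] := List.eq_nil_of_length_eq_zero (Nat.le_zero.mp h)
      subst this
      simp [PySem.Chars.splitOn.go, mySplit, List.modifyHead]
  | succ f ih =>
      intro l cur acc h
      cases l with
      | nil => simp [PySem.Chars.splitOn.go, mySplit, List.modifyHead]
      | cons c rest =>
          by_cases hc : c = '.'
          · subst hc
            have hpre : List.isPrefixOf ['.'] ('.' :: rest) = true := by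
              simp [List.isPrefixOf]
            rw [PySem.Chars.splitOn.go]
            simp only [hpre, if_true, List.length_cons, List.drop_succ_cons, List.length_nil, List.drop_zero]
            rw [ih rest [] ((List.reverse cur) :: acc) (by simpa using Nat.le_of_succ_le_succ h)]
            cases hm : mySplit rest with
            | nil => exact absurd hm (mySplit_ne_nil rest)
            | cons a b => simp [mySplit, hm, List.modifyHead]
          · have hpre : List.isPrefixOf ['.'] (c :: rest) = false := by
              simp [List.isPrefixOf]
              intro hcc; exact hc hcc.symm
            rw [PySem.Chars.splitOn.go]
            simp only [hpre, Bool.false_eq_true, if_false]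
            rw [ih rest (c :: cur) acc (by simpa using Nat.le_of_succ_le_succ h)]
            obtain ⟨h0, t0, he⟩ : ∃ h0 t0, mySplit rest = h0 :: t0 := by
              cases hm : mySplit rest with
              | nil => exact absurd hm (mySplit_ne_nil rest)
              | cons a b => exact ⟨a, b, rfl⟩
            simp [mySplit, hc, he, List.modifyHead]

lemma splitOn_dot (cs : List Char) : PySem.Chars.splitOn cs ['.'] = mySplit cs := by
  unfold PySem.Chars.splitOn
  rw [splitOn_go_eq (cs.length + 1) cs [] [] (Nat.le_succ _)]
  obtain ⟨h0, t0, he⟩ : ∃ h0 t0, mySplit cs = h0 :: t0 := by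
    cases hm : mySplit cs with
    | nil => exact absurd hm (mySplit_ne_nil cs)
    | cons a b => exact ⟨a, b, rfl⟩
  simp [he, List.modifyHead]

lemma checkDomainInner_cons_alnum (c : Char) (ys : List Char)
    (h : PySem.Chars.isalpha c = true ∨ PySem.Chars.isdigit c = true) :
    checkDomainInner (c :: ys) = checkDomainInner ys := by
  rcases h with h | h <;> simp [checkDomainInner, lettersA, numbersA, h]

lemma altScan_eq (cs : List Char) : ∀ (start : Bool),
    altScan cs start
      = if start then checkDomainLabels (mySplit cs)
        else (checkDomainInner (mySplit cs).headI && checkDomainLabels (mySplit cs).tail) := by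
  induction cs with
  | nil =>
      intro start
      cases start <;> simp [altScan, mySplit, checkDomainLabels, checkDomainInner]
  | cons c cs ih =>
      intro start
      obtain ⟨h0, t0, he⟩ : ∃ h0 t0, mySplit cs = h0 :: t0 := by
        cases hm : mySplit cs with
        | nil => exact absurd hm (mySplit_ne_nil cs)
        | cons a b => exact ⟨a, b, rfl⟩
      by_cases hc : c = '.'
      · subst hc
        cases start with
        | true => simp [altScan, mySplit, checkDomainLabels]
        | false =>
            simp only [altScan, if_true, Bool.false_eq_true, if_false, mySplit]
            rw [ih true]
            simp [checkDomainInner]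
      · have hsplit : mySplit (c :: cs) = (c :: h0) :: t0 := by
          simp [mySplit, hc, he, List.modifyHead]
        by_cases ha : PySem.Chars.isalpha c = true
        · have halnum : checkDomainInner (c :: h0) = checkDomainInner h0 :=
            checkDomainInner_cons_alnum c h0 (Or.inl ha)
          cases start with
          | true =>
              simp only [altScan, hc, if_false, ha, Bool.not_true, Bool.and_false,
                Bool.false_eq_true]
              rw [ih false]
              simp [hsplit, he, checkDomainLabels, lettersA, ha, halnum]
          | false =>
              simp only [altScan, hc, if_false, Bool.false_and, Bool.false_eq_true, ha,
                Bool.true_or, Bool.not_true]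
              rw [ih false]
              simp [hsplit, he, halnum]
        · have ha' : PySem.Chars.isalpha c = false := by
            cases hh : PySem.Chars.isalpha c
            · rfl
            · exact absurd hh ha
          cases start with
          | true =>
              simp [altScan, hc, ha', hsplit, checkDomainLabels, lettersA]
          | false =>
              by_cases hd : PySem.Chars.isdigit c = true
              · have halnum : checkDomainInner (c :: h0) = checkDomainInner h0 :=
                  checkDomainInner_cons_alnum c h0 (Or.inr hd)
                simp only [altScan, hc, if_false, Bool.false_and, Bool.false_eq_true, ha', hd,
                  Bool.or_true, Bool.not_true]
                rw [ih false]
                simp [hsplit, he, halnum]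
              · have hd' : PySem.Chars.isdigit c = false := by
                  cases hh : PySem.Chars.isdigit c
                  · rfl
                  · exact absurd hh hd
                simp [altScan, hc, ha', hd', hsplit, checkDomainInner, lettersA, numbersA]

lemma altScan_ws (cs : List Char) (hws : checkDomainWs cs = true) (start : Bool) :
    altScan cs start = false := by
  induction cs generalizing start with
  | nil => simp [checkDomainWs] at hws
  | cons c cs ih =>
      simp only [checkDomainWs] at hws
      by_cases hsp : c = ' ' || c = '\t'
      · have hne : c ≠ '.' := by
          rcases Bool.or_eq_true _ _ |>.mp hsp with h | h <;>
            · have := decide_eq_true_eq.mp h; subst this; decide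
        have ha : PySem.Chars.isalpha c = false := by
          rcases Bool.or_eq_true _ _ |>.mp hsp with h | h <;>
            · have := decide_eq_true_eq.mp h; subst this; decide
        have hd : PySem.Chars.isdigit c = false := by
          rcases Bool.or_eq_true _ _ |>.mp hsp with h | h <;>
            · have := decide_eq_true_eq.mp h; subst this; decide
        cases start <;> simp [altScan, hne, ha, hd]
      · simp only [hsp, Bool.false_eq_true, if_false] at hws
        by_cases hc : c = '.'
        · subst hc
          cases start <;> simp [altScan, ih hws]
        · simp only [altScan, hc, if_false]
          split_ifs <;> simp [ih hws]

-- ===== VERDICT (by name: the statement is the Claim_ definition above) =====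
theorem checkDomain_spec : Claim_equal_checkDomain := by
  intro domain _
  unfold Spec_checkDomain checkDomain checkDomain_alt
  rw [splitOn_dot]
  by_cases hws : checkDomainWs domain.toList = true
  · rw [if_pos hws, altScan_ws domain.toList hws true]
  · have hws' : checkDomainWs domain.toList = false := by
      cases h : checkDomainWs domain.toList
      · rfl
      · exact absurd h hws
    rw [hws', if_neg (by simp)]
    rw [altScan_eq domain.toList true]
    simp
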